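-- pv_equiv track=rewrite | github.com/Len-Yan/wsu-355 | HW3.py | searchDicts
-- ===== SOURCE A (Python) =====
-- def searchDicts(L,k):
--     L.reverse()             # reverse it for backorder
--
--     for l in L:
--         if l.get(k) != None:
--             out = l.get(k)
--             L.reverse()     # reverse L back to original List
--             return out
--     L.reverse()             # reverse L back to original List
--     return None
-- ===== SOURCE B (Python) =====
-- def searchDicts(L, k):
--     result = None
--     for d in L:
--         v = d.get(k)
--         if v != None:
--             result = v
--     return result
-- ===== Notes on version B (the rewrite author's own statement) =====
-- stated objective: simpler
-- what changed: B replaces A's reverse-scan-with-early-return-and-restore (two list reversals mutating L in place) by a single forward pass with an overwriting accumulator, so the last forward match wins without touching L.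
import Mathlib
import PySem

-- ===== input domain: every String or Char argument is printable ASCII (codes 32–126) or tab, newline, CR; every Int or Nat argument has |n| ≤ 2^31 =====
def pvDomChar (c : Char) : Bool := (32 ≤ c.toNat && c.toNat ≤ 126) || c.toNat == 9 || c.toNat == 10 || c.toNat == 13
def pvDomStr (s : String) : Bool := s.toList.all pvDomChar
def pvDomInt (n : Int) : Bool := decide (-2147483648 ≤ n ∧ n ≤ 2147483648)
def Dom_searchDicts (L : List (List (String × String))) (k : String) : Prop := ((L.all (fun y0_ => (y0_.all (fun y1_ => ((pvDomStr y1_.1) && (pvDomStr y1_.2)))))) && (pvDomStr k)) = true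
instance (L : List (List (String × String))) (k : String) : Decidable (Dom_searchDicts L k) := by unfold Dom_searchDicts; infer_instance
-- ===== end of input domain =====

-- ===== PORT A =====
-- Header: B does one forward pass with an overwriting accumulator instead of A's reverse/early-return/restore;
-- A reverses L in place but restores it before returning, so the return value is the whole observable behaviour.
-- l.get(k): first-match lookup in the association list (Python dict keys are unique)
def pvGet (d : List (String × String)) (k : String) : Option String :=
  (d.find? (fun p => p.1 == k)).map (fun p => p.2)

-- A's loop over the reversed list: return the first dict whose get(k) is not None
def searchDictsLoop (L : List (List (String × String))) (k : String) : Option String :=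
  match L with
  | [] => none
  | l :: rest =>
    match pvGet l k with
    | some v => some v
    | none => searchDictsLoop rest k

def searchDicts (L : List (List (String × String))) (k : String) : Option String :=
  searchDictsLoop L.reverse k

-- ===== PORT B =====
def searchDicts_alt (L : List (List (String × String))) (k : String) : Option String :=
  L.foldl (fun result d =>
    match pvGet d k with
    | some v => some v
    | none => result) none

-- ===== PRECONDITION & SPEC =====
def Spec_searchDicts (L : List (List (String × String))) (k : String) (out : Option String) : Prop := out = searchDicts_alt L k
instance (L : List (List (String × String))) (k : String) (out : Option String) : Decidable (Spec_searchDicts L k out) := by unfold Spec_searchDicts; infer_instance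

-- ===== CLAIM (what is proved, stated in full; the proofs are below) =====
def Claim_equal_searchDicts : Prop := ∀ (L : List (List (String × String))) (k : String), Dom_searchDicts L k → Spec_searchDicts L k (searchDicts L k)

-- ===== LEMMAS AND PROOFS =====

-- ===== VERDICT (by name: the statement is the Claim_ definition above) =====
-- A's reverse-scan splits over append: the earlier (reversed) part wins
theorem searchDictsLoop_append (xs ys : List (List (String × String))) (k : String) :
    searchDictsLoop (xs ++ ys) k =
      match searchDictsLoop xs k with
      | some v => some v
      | none => searchDictsLoop ys k := by
  induction xs with
  | nil => simp [searchDictsLoop]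
  | cons l rest ih =>
    simp only [List.cons_append, searchDictsLoop, ih]
    cases pvGet l k <;> rfl

-- loop invariant for B's fold: the accumulator is the fallback when the reversed scan finds nothing
theorem foldl_eq_revScan (L : List (List (String × String))) (k : String)
    (acc : Option String) :
    L.foldl (fun result d =>
      match pvGet d k with
      | some v => some v
      | none => result) acc =
      match searchDictsLoop L.reverse k with
      | some v => some v
      | none => acc := by
  induction L generalizing acc with
  | nil => simp [searchDictsLoop]
  | cons l rest ih =>
    simp only [List.foldl_cons, List.reverse_cons, searchDictsLoop_append, ih]
    cases searchDictsLoop rest.reverse k with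
    | some v => rfl
    | none => simp [searchDictsLoop]; cases pvGet l k <;> rfl

theorem searchDicts_spec : Claim_equal_searchDicts := by
  intro L k _
  unfold Spec_searchDicts searchDicts searchDicts_alt
  rw [foldl_eq_revScan]
  cases searchDictsLoop L.reverse k <;> rfl
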